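-- pv_equiv track=rewrite | github.com/MiroSanne/IsomorphismChecker | finding_forests.py | counting_trees
-- ===== SOURCE A (Python) =====
-- def counting_trees(trees = list[list[str]]):
--     counts = {}
--     for t in trees:
--         key = tuple(sorted(t))
--         if key in counts:
--             counts[key] += 1
--         else:
--             counts[key] = 1
--     return counts
-- ===== SOURCE B (Python) =====
-- def counting_trees(trees = list[list[str]]):
--     keys = [tuple(sorted(t)) for t in trees]
--     result = {}
--     while keys:
--         k = keys[0]
--         rest = [x for x in keys if x != k]
--         result[k] = len(keys) - len(rest)
--         keys = rest
--     return result
-- ===== Notes on version B (the rewrite author's own statement) =====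
-- stated objective: alternative
-- what changed: Replaced A's incremental dict-counter loop (per-element membership test and increment) by a partition loop: repeatedly take the first remaining canonical key, compute its whole group's count as the length drop when filtering that key out, and continue on the filtered remainder; first-occurrence order of distinct keys reproduces A's dict order.
import Mathlib
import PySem

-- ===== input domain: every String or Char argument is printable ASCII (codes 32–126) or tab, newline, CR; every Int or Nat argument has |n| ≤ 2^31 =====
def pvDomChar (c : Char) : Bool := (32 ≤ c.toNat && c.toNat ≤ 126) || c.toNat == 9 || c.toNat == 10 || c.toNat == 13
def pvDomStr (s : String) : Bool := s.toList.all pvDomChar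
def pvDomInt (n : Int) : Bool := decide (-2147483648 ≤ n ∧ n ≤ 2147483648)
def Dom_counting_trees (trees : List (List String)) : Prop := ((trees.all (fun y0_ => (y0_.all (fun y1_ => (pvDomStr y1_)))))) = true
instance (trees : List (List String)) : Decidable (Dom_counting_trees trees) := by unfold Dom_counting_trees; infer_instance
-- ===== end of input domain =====

-- B replaces A's incremental dict-counter loop by a partition loop that removes one whole key group per step (objective: alternative).

-- ===== PORT A =====
-- counts = {}; for t in trees: key = tuple(sorted(t)); counts[key] = counts[key]+1 if present else 1; return counts
def counting_trees (trees : List (List String)) : List (List String × Int) :=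
  (trees.foldl (fun counts t =>
      let key := PySem.List.sorted t (fun x => x) false
      if counts.contains key then counts.insert key (counts.getD key 0 + 1)
      else counts.insert key 1)
    PySem.Dict.empty).items

-- ===== PORT B =====
-- while keys: k = keys[0]; rest = [x for x in keys if x != k]; result[k] = len(keys) - len(rest); keys = rest
def ctGo : List (List String) → PySem.Dict (List String) Int → PySem.Dict (List String) Int
  | [], result => result
  | k :: tl, result =>
      let keys := k :: tl
      let rest := keys.filter (fun x => x != k)
      ctGo rest (result.insert k ((keys.length : Int) - (rest.length : Int)))
  termination_by ks _ => ks.length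
  decreasing_by
    simp only [List.filter_cons, bne_self_eq_false, Bool.false_eq_true, ↓reduceIte,
      List.length_cons]
    have := List.length_filter_le (fun x => x != k) tl
    omega

-- keys = [tuple(sorted(t)) for t in trees]; then the while-loop above; return result
def counting_trees_alt (trees : List (List String)) : List (List String × Int) :=
  let keys := trees.map (fun t => PySem.List.sorted t (fun x => x) false)
  (ctGo keys PySem.Dict.empty).items

-- ===== PRECONDITION & SPEC =====
def Spec_counting_trees (trees : List (List String)) (out : List (List String × Int)) : Prop := out = counting_trees_alt trees
instance (trees : List (List String)) (out : List (List String × Int)) : Decidable (Spec_counting_trees trees out) := by unfold Spec_counting_trees; infer_instance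

-- ===== CLAIM (what is proved, stated in full; the proofs are below) =====
def Claim_equal_counting_trees : Prop := ∀ (trees : List (List String)), Dom_counting_trees trees → Spec_counting_trees trees (counting_trees trees)

-- ===== LEMMAS AND PROOFS =====

-- A's loop body is the canonical "insert key (getD+1)" step (the else-branch writes 1 = 0 + 1).
theorem counting_trees_step (counts : PySem.Dict (List String) Int) (k : List String) :
    (if counts.contains k then counts.insert k (counts.getD k 0 + 1) else counts.insert k 1)
      = counts.insert k (counts.getD k 0 + 1) := by
  by_cases h : counts.contains k = true
  · simp [h]
  · have h' : counts.contains k = false := by simpa using h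
    simp [h', PySem.Dict.getD_of_not_contains]

-- set(xs) commutes with filtering
theorem ofList_filter {α : Type} [BEq α] [LawfulBEq α] (p : α → Bool) (xs : List α) :
    PySem.Set.ofList (xs.filter p) = (PySem.Set.ofList xs).filter p := by
  induction xs with
  | nil => rfl
  | cons a xs ih =>
      by_cases hp : p a = true
      · simp only [List.filter_cons, hp, if_true, PySem.Set.ofList_cons, PySem.Set.discard, ih,
          List.filter_filter]
        refine congrArg (a :: ·) ?_
        apply List.filter_congr
        intro x _
        exact Bool.and_comm _ _
      · have hp' : p a = false := by simpa using hp
        simp only [List.filter_cons, hp', PySem.Set.ofList_cons, PySem.Set.discard,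
          List.filter_filter, ih, Bool.false_eq_true, ↓reduceIte]
        apply List.filter_congr
        intro x hx
        by_cases hxp : p x = true
        · have : x ≠ a := by rintro rfl; rw [hxp] at hp'; exact absurd hp' (by simp)
          simp [hxp, this]
        · simp [Bool.eq_false_iff.mpr hxp]

-- length drop when filtering out k = number of occurrences of k (B's group-count step)
theorem filter_ne_length (k : List String) (tl : List (List String)) :
    (tl.filter (fun x => x != k)).length + tl.count k = tl.length := by
  induction tl with
  | nil => simp
  | cons a l ih =>
      by_cases h : a = k <;> [skip; skip] <;> (simp [h, bne] at ih ⊢; omega)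

-- B's partition loop computes exactly the counter's items, appended after the accumulator's.
theorem ctGo_items_aux (n : Nat) : ∀ (ks : List (List String)), ks.length ≤ n →
    ∀ (d : PySem.Dict (List String) Int), (∀ x ∈ ks, d.contains x = false) →
    (ctGo ks d).items
      = d.items ++ (PySem.Set.ofList ks).map (fun k => (k, (ks.count k : Int))) := by
  induction n with
  | zero =>
      intro ks hlen d _
      have : ks = [] := List.eq_nil_of_length_eq_zero (Nat.le_zero.mp hlen)
      subst this
      simp [ctGo]
  | succ n ih =>
      intro ks hlen d h
      match ks with
      | [] => simp [ctGo]
      | k :: tl =>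
      rw [ctGo]
      have hrest : (k :: tl).filter (fun x => x != k) = tl.filter (fun x => x != k) := by
        simp
      have hrlen : ((k :: tl).filter (fun x => x != k)).length ≤ n := by
        rw [hrest]
        have := List.length_filter_le (fun x => x != k) tl
        simp only [List.length_cons] at hlen
        omega
      have hcontains : ∀ x ∈ (k :: tl).filter (fun x => x != k),
          (d.insert k (((k :: tl).length : Int) - ((k :: tl).filter (fun x => x != k)).length)).contains x = false := by
        intro x hx
        rw [hrest] at hx
        have hmem := List.mem_of_mem_filter hx
        have hne : (x == k) = false := by
          have := List.of_mem_filter hx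
          simpa using this
        rw [PySem.Dict.contains_insert, hne]
        simpa using h x (List.mem_cons_of_mem _ hmem)
      rw [ih _ hrlen _ hcontains]
      have hk : d.contains k = false := h k (List.mem_cons_self)
      rw [PySem.Dict.items_insert_of_not_contains _ _ hk]
      rw [List.append_assoc]
      refine congrArg (d.items ++ ·) ?_
      -- count of the group = length drop
      have hlen2 : ((k :: tl).length : Int) - ((k :: tl).filter (fun x => x != k)).length
          = ((k :: tl).count k : Int) := by
        rw [hrest]
        have hs := filter_ne_length k tl
        have h4 : (k :: tl).count k = tl.count k + 1 := by simp
        rw [h4]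
        simp only [List.length_cons]
        push_cast
        omega
      -- distinct keys of the remainder, shifted counts
      have hset : PySem.Set.ofList ((k :: tl).filter (fun x => x != k))
          = (PySem.Set.ofList tl).filter (fun y => !(y == k)) := by
        rw [hrest, ofList_filter]
        apply List.filter_congr; intro x _; cases h : x == k <;> simp [bne, h]
      have hmap : ∀ x ∈ PySem.Set.ofList ((k :: tl).filter (fun x => x != k)),
          ((k :: tl).filter (fun x => x != k)).count x = (k :: tl).count x := by
        intro x hx
        have hxm : x ∈ (k :: tl).filter (fun x => x != k) := (PySem.Set.mem_ofList _ _).mp hx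
        have hne : (fun y => y != k) x = true := List.of_mem_filter (p := fun y => y != k) hxm
        rw [List.count_filter (p := fun y => y != k) hne]
      calc ((k, ((k :: tl).length : Int) - ((k :: tl).filter (fun x => x != k)).length) ::
              (PySem.Set.ofList ((k :: tl).filter (fun x => x != k))).map
                (fun x => (x, (((k :: tl).filter (fun x => x != k)).count x : Int))))
          = (k, ((k :: tl).count k : Int)) ::
              (PySem.Set.ofList ((k :: tl).filter (fun x => x != k))).map
                (fun x => (x, ((k :: tl).count x : Int))) := by
            rw [hlen2]
            refine congrArg _ ?_
            apply List.map_congr_left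
            intro x hx
            rw [hmap x hx]
        _ = (PySem.Set.ofList (k :: tl)).map (fun x => (x, ((k :: tl).count x : Int))) := by
            rw [hset, PySem.Set.ofList_cons]
            simp [PySem.Set.discard]

theorem ctGo_items (ks : List (List String)) (d : PySem.Dict (List String) Int)
    (h : ∀ x ∈ ks, d.contains x = false) :
    (ctGo ks d).items
      = d.items ++ (PySem.Set.ofList ks).map (fun k => (k, (ks.count k : Int))) :=
  ctGo_items_aux ks.length ks (le_refl _) d h

-- ===== VERDICT (by name: the statement is the Claim_ definition above) =====
theorem counting_trees_spec : Claim_equal_counting_trees := by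
  intro trees _
  unfold Spec_counting_trees counting_trees counting_trees_alt
  simp only []
  set keys := trees.map (fun t => PySem.List.sorted t (fun x => x) false) with hkeys
  have hA : (trees.foldl (fun counts t =>
      let key := PySem.List.sorted t (fun x => x) false
      if counts.contains key then counts.insert key (counts.getD key 0 + 1)
      else counts.insert key 1) PySem.Dict.empty)
      = PySem.Dict.counter keys := by
    rw [← PySem.Dict.foldl_insert_getD_add_one_eq_counter, hkeys, List.foldl_map]
    apply PySem.List.foldl_congr_mem
    intro d t _
    exact counting_trees_step d _
  rw [hA, PySem.Dict.items_counter]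
  rw [ctGo_items keys PySem.Dict.empty (by intro x _; simp [PySem.Dict.contains_empty])]
  rfl
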